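-- pv_equiv track=rewrite | github.com/alythobani/Project_Euler_Python | 35.py | find_all_rotations
-- ===== SOURCE A (Python) =====
-- def find_all_rotations(number_string):
--     """Return an array of all rotations of digits in number_string."""
--     if len(number_string) == 1:
--         return [number_string]
--     rotation_array = [number_string]
--     for i in range(len(number_string) - 1):
--         first_digit = number_string[0]
--         other_digits = number_string[1:]
--         number_string = other_digits + first_digit
--         rotation_array.append(number_string)
--     return rotation_array
-- ===== SOURCE B (Python) =====
-- def find_all_rotations(number_string):
--     """Return an array of all rotations of digits in number_string."""
--     if not number_string:
--         return [number_string]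
--     return [number_string[i:] + number_string[:i] for i in range(len(number_string))]
-- ===== Notes on version B (the rewrite author's own statement) =====
-- stated objective: simpler
-- what changed: Each rotation is computed independently by slicing the original string at index i (s[i:]+s[:i]) instead of threading a rolling rotated string through a loop and appending it step by step.
import Mathlib
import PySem

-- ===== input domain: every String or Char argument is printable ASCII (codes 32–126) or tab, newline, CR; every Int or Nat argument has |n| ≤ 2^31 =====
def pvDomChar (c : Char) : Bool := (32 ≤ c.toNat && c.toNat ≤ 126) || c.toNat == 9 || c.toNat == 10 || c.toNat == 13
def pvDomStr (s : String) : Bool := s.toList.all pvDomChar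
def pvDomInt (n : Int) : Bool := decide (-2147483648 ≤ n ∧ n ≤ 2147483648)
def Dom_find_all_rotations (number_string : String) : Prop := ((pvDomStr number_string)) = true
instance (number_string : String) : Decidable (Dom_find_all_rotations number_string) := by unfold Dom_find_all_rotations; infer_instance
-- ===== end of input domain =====

-- B computes each rotation independently by slicing at index i instead of threading a
-- rolling rotated string through the loop (objective: simpler; same cost).

-- ===== PORT A =====
-- one loop step: first_digit = number_string[0]; other_digits = number_string[1:];
-- number_string = other_digits + first_digit; rotation_array.append(number_string).
-- number_string[0] is ported as pyGetD _ 0 ' ': the loop body only runs on a nonempty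
-- string (range(len-1) is empty for len ≤ 1), where pyGetD agrees with Python's s[0].
def pvStepA (st : List Char × List (List Char)) (_ : Int) : List Char × List (List Char) :=
  let first_digit := PySem.List.pyGetD st.1 0 ' '
  let other_digits := PySem.List.slice st.1 (some 1) none
  let ns := other_digits ++ [first_digit]
  (ns, st.2 ++ [ns])

def find_all_rotations (number_string : String) : List String :=
  let cs := number_string.toList
  if cs.length == 1 then [number_string]
  else
    let st := (PySem.List.pyRange 0 ((cs.length : Int) - 1) 1).foldl pvStepA (cs, [cs])
    st.2.map String.ofList

-- ===== PORT B =====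
def find_all_rotations_alt (number_string : String) : List String :=
  let cs := number_string.toList
  if cs.length == 0 then [number_string]
  else
    (PySem.List.pyRange 0 (cs.length : Int) 1).map
      (fun i => String.ofList (PySem.List.slice cs (some i) none ++ PySem.List.slice cs none (some i)))

-- ===== PRECONDITION & SPEC =====
def Spec_find_all_rotations (number_string : String) (out : List String) : Prop := out = find_all_rotations_alt number_string
instance (number_string : String) (out : List String) : Decidable (Spec_find_all_rotations number_string out) := by unfold Spec_find_all_rotations; infer_instance

-- ===== CLAIM (what is proved, stated in full; the proofs are below) =====
def Claim_equal_find_all_rotations : Prop := ∀ (number_string : String), Dom_find_all_rotations number_string → Spec_find_all_rotations number_string (find_all_rotations number_string)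

-- ===== LEMMAS AND PROOFS =====

lemma pyRange_cast (n : Nat) :
    PySem.List.pyRange 0 (n : Int) 1 = (List.range n).map (Nat.cast : Nat → Int) := by
  induction n with
  | zero => decide
  | succ n ih =>
    have h : PySem.List.pyRange 0 ((n + 1 : Nat) : Int) 1
        = PySem.List.pyRange 0 (n : Int) 1 ++ PySem.List.pyRange (n : Int) ((n + 1 : Nat) : Int) 1 := by
      apply PySem.List.pyRange_one_append <;> push_cast <;> omega
    have h2 : PySem.List.pyRange (n : Int) ((n + 1 : Nat) : Int) 1 = [(n : Int)] := by
      rw [PySem.List.pyRange_one_cons (by push_cast; omega)]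
      simp [PySem.List.pyRange]
    rw [h, h2, ih, List.range_succ]
    simp

-- loop invariant for A: after n steps the rolling string is cs.drop n ++ cs.take n and
-- the accumulator holds the rotations 0..n in order.
lemma loopA (cs : List Char) (n : Nat) (hn : n ≤ cs.length) :
    (PySem.List.pyRange 0 (n : Int) 1).foldl pvStepA (cs, [cs]) =
      (cs.drop n ++ cs.take n,
       (List.range (n + 1)).map (fun i => cs.drop i ++ cs.take i)) := by
  induction n with
  | zero => simp
  | succ n ih =>
    have hlt : n < cs.length := by omega
    have h : PySem.List.pyRange 0 ((n + 1 : Nat) : Int) 1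
        = PySem.List.pyRange 0 (n : Int) 1 ++ [(n : Int)] := by
      rw [pyRange_cast, pyRange_cast, List.range_succ]; simp
    rw [h, List.foldl_append, ih (by omega)]
    have hdrop : cs.drop n = cs[n] :: cs.drop (n + 1) := List.drop_eq_getElem_cons hlt
    have htake : cs.take (n + 1) = cs.take n ++ [cs[n]] := by
      rw [List.take_add_one]; simp [List.getElem?_eq_getElem hlt]
    simp only [List.foldl_cons, List.foldl_nil, pvStepA]
    rw [PySem.List.slice_from_one]
    have hget : PySem.List.pyGetD (cs.drop n ++ cs.take n) 0 ' ' = cs[n] := by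
      rw [hdrop, List.cons_append, PySem.List.pyGetD_zero_cons]
    have htail : (cs.drop n ++ cs.take n).tail = cs.drop (n + 1) ++ cs.take n := by
      rw [hdrop, List.cons_append, List.tail_cons]
    have hns : (cs.drop n ++ cs.take n).tail ++ [PySem.List.pyGetD (cs.drop n ++ cs.take n) 0 ' ']
        = cs.drop (n + 1) ++ cs.take (n + 1) := by
      rw [htail, hget, htake, List.append_assoc]
    rw [hns, List.range_succ, List.map_append]
    simp [List.range_succ]

lemma both_eq (s : String) (h : s.toList ≠ []) :
    find_all_rotations_alt s
      = ((List.range s.toList.length).map (fun i => s.toList.drop i ++ s.toList.take i)).map String.ofList := by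
  unfold find_all_rotations_alt
  have hlen : s.toList.length ≠ 0 := by simpa using h
  simp only [beq_iff_eq, hlen, if_false]
  rw [pyRange_cast, List.map_map, List.map_map]
  refine List.map_congr_left ?_
  intro i hi
  show String.ofList (PySem.List.slice s.toList (some (i : Int)) none ++ PySem.List.slice s.toList none (some (i : Int))) = _
  rw [PySem.List.slice_from_natCast, PySem.List.slice_to_natCast]
  rfl

-- ===== VERDICT (by name: the statement is the Claim_ definition above) =====
theorem find_all_rotations_spec : Claim_equal_find_all_rotations := by
  intro s _
  unfold Spec_find_all_rotations find_all_rotations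
  by_cases h0 : s.toList = []
  · have hs : s = "" := by
      have := congrArg String.ofList h0
      simpa using this
    subst hs
    decide
  · have hlen : 1 ≤ s.toList.length := List.length_pos_of_ne_nil h0
    rw [both_eq s h0]
    by_cases h1 : s.toList.length = 1
    · simp only [h1, beq_self_eq_true, if_true]
      simp [List.range_one]
    · simp only [beq_iff_eq, h1, if_false]
      have hc : ((s.toList.length : Int) - 1) = ((s.toList.length - 1 : Nat) : Int) := by
        push_cast [hlen]; omega
      rw [hc, loopA s.toList (s.toList.length - 1) (by omega)]
      have : s.toList.length - 1 + 1 = s.toList.length := by omega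
      rw [this]
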